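-- pv_equiv track=rewrite | github.com/LebronL-commits/Yoka_task | xieyi21214new/publicfuc_kf2input.py | getJudgeSpellMark
-- ===== SOURCE A (Python) =====
-- def getJudgeSpellMark(info):
--     ret = [0, 0, 0]
--     for ini in info:
--         if ini['spellid'] == '15':
--             ret[0] = 1
--         elif ini['spellid'] == '84':
--             ret[1] = 1
--         elif ini['spellid'] =='11':
--             ret[2] = 1
--     return ret
-- ===== SOURCE B (Python) =====
-- def getJudgeSpellMark(info):
--     # Inverted traversal: loop over the three target ids, and for each run an
--     # independent short-circuiting scan of the data, instead of A's single
--     # data pass with if/elif flag assignments.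
--     return [int(any(ini['spellid'] == t for ini in info))
--             for t in ('15', '84', '11')]
-- ===== Notes on version B (the rewrite author's own statement) =====
-- stated objective: alternative
-- what changed: Inverts the loop nesting: instead of A's single pass over the data with three-way if/elif flag assignments into a mutated list, B loops over the three target ids and answers each with an independent short-circuiting any() scan of the data.
import Mathlib
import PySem

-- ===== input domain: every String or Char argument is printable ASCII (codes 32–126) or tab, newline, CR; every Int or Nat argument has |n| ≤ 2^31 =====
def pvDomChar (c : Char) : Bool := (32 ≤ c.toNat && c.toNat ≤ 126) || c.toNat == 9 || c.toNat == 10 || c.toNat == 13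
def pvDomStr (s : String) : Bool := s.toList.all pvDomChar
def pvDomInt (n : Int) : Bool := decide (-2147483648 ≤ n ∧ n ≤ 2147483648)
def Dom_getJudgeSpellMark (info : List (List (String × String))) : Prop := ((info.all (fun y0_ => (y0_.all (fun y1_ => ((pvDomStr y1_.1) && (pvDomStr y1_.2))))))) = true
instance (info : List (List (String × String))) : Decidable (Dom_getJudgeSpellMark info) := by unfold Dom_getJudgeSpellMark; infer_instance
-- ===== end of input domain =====

-- B inverts the loop nesting: an outer loop over the three target ids with an independent
-- short-circuiting scan per target, instead of A's single data pass with if/elif flag writes.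


-- ===== PORT A =====
-- ini['spellid'] (KeyError when missing is excluded by Pre_; under Pre_ the key is present)
def spellidOf (ini : List (String × String)) : String :=
  ((PySem.Dict.mk ini).get? "spellid").getD ""

-- the loop body: if/elif/elif writing into ret at indices 0/1/2
def markStep (ret : List Int) (ini : List (String × String)) : List Int :=
  if spellidOf ini = "15" then PySem.List.pySetD ret 0 1
  else if spellidOf ini = "84" then PySem.List.pySetD ret 1 1
  else if spellidOf ini = "11" then PySem.List.pySetD ret 2 1
  else ret

def getJudgeSpellMark (info : List (List (String × String))) : List Int :=
  info.foldl markStep [0, 0, 0]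

-- ===== PORT B =====
-- outer loop over the targets; per target a short-circuiting scan (any) of the data
def getJudgeSpellMark_alt (info : List (List (String × String))) : List Int :=
  ["15", "84", "11"].map (fun t =>
    if info.any (fun ini => spellidOf ini = t) then 1 else 0)

-- ===== PRECONDITION & SPEC =====
-- Pre_ excludes exactly the rows without a 'spellid' key, on which A raises KeyError.
def Pre_getJudgeSpellMark (info : List (List (String × String))) : Prop :=
  (info.all (fun ini => ((PySem.Dict.mk ini).get? "spellid").isSome)) = true
instance (info : List (List (String × String))) : Decidable (Pre_getJudgeSpellMark info) := by unfold Pre_getJudgeSpellMark; infer_instance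
def pvWitness_getJudgeSpellMark : (List (List (String × String))) := [[("spellid", "15")], [("spellid", "7")]]
def Spec_getJudgeSpellMark (info : List (List (String × String))) (out : List Int) : Prop := out = getJudgeSpellMark_alt info
instance (info : List (List (String × String))) (out : List Int) : Decidable (Spec_getJudgeSpellMark info out) := by unfold Spec_getJudgeSpellMark; infer_instance

-- ===== CLAIM (what is proved, stated in full; the proofs are below) =====
def Claim_equal_getJudgeSpellMark : Prop := ∀ (info : List (List (String × String))), Dom_getJudgeSpellMark info → Pre_getJudgeSpellMark info → Spec_getJudgeSpellMark info (getJudgeSpellMark info)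

-- ===== LEMMAS AND PROOFS =====

-- A's fold from an arbitrary 3-element state: each slot becomes 1 iff some row carries its id.
theorem foldl_markStep (info : List (List (String × String))) :
    ∀ (a b c : Int), info.foldl markStep [a, b, c] =
      [if info.any (fun ini => spellidOf ini = "15") then 1 else a,
       if info.any (fun ini => spellidOf ini = "84") then 1 else b,
       if info.any (fun ini => spellidOf ini = "11") then 1 else c] := by
  induction info with
  | nil => intro a b c; simp
  | cons ini rest ih =>
    intro a b c
    simp only [List.foldl_cons, List.any_cons, markStep]
    by_cases h15 : spellidOf ini = "15"
    · simp [h15, PySem.List.pySetD, PySem.List.pySet?, PySem.List.pyIdx?, ih]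
    · by_cases h84 : spellidOf ini = "84"
      · simp [h84, PySem.List.pySetD, PySem.List.pySet?, PySem.List.pyIdx?, ih]
      · by_cases h11 : spellidOf ini = "11"
        · simp [h11, PySem.List.pySetD, PySem.List.pySet?, PySem.List.pyIdx?, ih]
        · simp [h15, h84, h11, ih]

-- ===== VERDICT (by name: the statement is the Claim_ definition above) =====
theorem getJudgeSpellMark_spec : Claim_equal_getJudgeSpellMark := by
  intro info _ _
  unfold Spec_getJudgeSpellMark getJudgeSpellMark getJudgeSpellMark_alt
  rw [foldl_markStep]
  simp
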